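-- pv_equiv track=rewrite | github.com/M2nzy/algorithm | 프로그래머스/2/42586. 기능개발/기능개발.py | solution
-- ===== SOURCE A (Python) =====
-- from collections import deque
--
-- def solution(progresses, speeds):
--     answer = []
--     progresses = deque(progresses)
--     speeds = deque(speeds)
--     result = deque()
--     while progresses:
--         cur = progresses.pop()
--         curSpeed = speeds.pop()
--         count = 0
--         while cur < 100:
--             cur += curSpeed
--             count += 1
--         if cur >= 100:
--             result.append(count)
--
--     # result가 반대로 되어있음
--     tmp = []
--     while result:
--         if not tmp:
--             cur = result.pop()
--             tmp.append(cur)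
--         else:
--             cur = result.pop()
--             if cur <= tmp[0]:
--                 tmp.append(cur)
--             else:
--                 answer.append(len(tmp))
--                 tmp = []
--                 tmp.append(cur)
--
--     if tmp:
--         answer.append(len(tmp))
--
--     return answer
-- ===== SOURCE B (Python) =====
-- def solution(progresses, speeds):
--     # each task pairs with its speed counting from the end (the lists are consumed as
--     # parallel stacks); days until done by one closed-form ceiling division per task
--     days = [0 if p >= 100 else (99 - p) // s + 1
--             for p, s in zip(reversed(progresses), reversed(speeds))]
--     days.reverse()
--     if not days:
--         return []
--     answer = []
--     lead = days[0]
--     count = 1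
--     for d in days[1:]:
--         if d <= lead:
--             count += 1
--         else:
--             answer.append(count)
--             lead, count = d, 1
--     answer.append(count)
--     return answer
-- ===== Notes on version B (the rewrite author's own statement) =====
-- stated objective: faster
-- what changed: B computes each task's remaining days with one closed-form ceiling division instead of A's step-by-step +speed simulation loop, and counts deploy-group sizes in a single forward pass with a running leader instead of A's deque-reversal plus tmp-stack rebuild; intended as faster (A's cost grows with the number of simulated days: a timing run saw A time out at n=16 where B returned, though no clean ratio could be measured); Pre_ excludes inputs with fewer speeds than tasks (A raises IndexError) and tasks with progress<100 and speed<=0 (A loops forever).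
import Mathlib
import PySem

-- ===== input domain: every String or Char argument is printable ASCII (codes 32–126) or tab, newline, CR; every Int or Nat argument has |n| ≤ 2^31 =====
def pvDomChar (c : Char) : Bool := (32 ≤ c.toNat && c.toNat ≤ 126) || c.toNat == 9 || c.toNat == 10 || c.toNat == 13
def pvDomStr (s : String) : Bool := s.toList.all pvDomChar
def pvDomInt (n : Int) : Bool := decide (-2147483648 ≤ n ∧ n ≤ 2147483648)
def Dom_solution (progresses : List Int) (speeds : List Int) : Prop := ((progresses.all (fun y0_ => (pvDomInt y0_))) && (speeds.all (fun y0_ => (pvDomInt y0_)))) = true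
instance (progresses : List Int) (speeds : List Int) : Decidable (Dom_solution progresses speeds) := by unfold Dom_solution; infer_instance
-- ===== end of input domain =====

-- B replaces A's per-task +speed simulation by a closed-form ceiling division and A's
-- deque-reversal + tmp-stack grouping by one forward pass with a running leader; intended as
-- faster (a timing run saw A time out at n=16 where B returned; no clean ratio measured).

-- ===== PORT A =====
-- inner 'while cur < 100: cur += curSpeed; count += 1' loop; fuel makes it total
-- (fuel 2^31+100 never runs out on inputs in Dom ∧ Pre_); returns (final cur, count)
-- state (cur, count); tail-recursive so long runs evaluate in constant stack
def loopA : Nat → Int → Int → Int → Int × Int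
  | 0, cur, _, count => (cur, count)
  | fuel + 1, cur, s, count =>
      if cur < 100 then loopA fuel (cur + s) s (count + 1)
      else (cur, count)

def fuelA : Nat := 2147483748

-- outer 'while progresses:' loop; pop() from the right is modelled by recursing on the
-- reversed lists; 'result' is the deque appended on the right
def phase1 : List Int → List Int → List Int → List Int
  | [], _, result => result
  | _ :: _, [], result => result   -- speeds exhausted: Python raises IndexError here (outside Pre_)
  | p :: ps, s :: ss, result =>
      let r := loopA fuelA p s 0
      phase1 ps ss (if 100 ≤ r.1 then result ++ [r.2] else result)

-- second 'while result:' loop; result.pop() from the right = recursing on result.reverse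
def phase2 : List Int → List Int → List Int → List Int
  | [], tmp, answer => if tmp.isEmpty then answer else answer ++ [(tmp.length : Int)]
  | c :: rest, tmp, answer =>
      match tmp with
      | [] => phase2 rest [c] answer
      | t0 :: _ =>
          if c ≤ t0 then phase2 rest (tmp ++ [c]) answer
          else phase2 rest [c] (answer ++ [(tmp.length : Int)])

def solution (progresses : List Int) (speeds : List Int) : List Int :=
  phase2 (phase1 progresses.reverse speeds.reverse []).reverse [] []

-- ===== PORT B =====
-- grouping pass: current group leader 'lead' and its running size 'count'
def groupB : List Int → Int → Int → List Int
  | [], _, count => [count]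
  | d :: ds, lead, count =>
      if d ≤ lead then groupB ds lead (count + 1)
      else count :: groupB ds d 1

def solution_alt (progresses : List Int) (speeds : List Int) : List Int :=
  let days := ((progresses.reverse.zip speeds.reverse).map
    (fun pr => if 100 ≤ pr.1 then 0 else PySem.Int.floordiv (99 - pr.1) pr.2 + 1)).reverse
  match days with
  | [] => []
  | d :: ds => groupB ds d 1

-- ===== PRECONDITION & SPEC =====
-- Pre_ excludes: (a) inputs with fewer speeds than tasks, on which A raises IndexError;
-- (b) any popped task with progress < 100 and speed ≤ 0, on which A loops forever.
def Pre_solution (progresses : List Int) (speeds : List Int) : Prop :=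
  progresses.length ≤ speeds.length ∧
    ∀ pr ∈ progresses.reverse.zip speeds.reverse, 100 ≤ pr.1 ∨ 1 ≤ pr.2
instance (progresses : List Int) (speeds : List Int) : Decidable (Pre_solution progresses speeds) := by
  unfold Pre_solution; infer_instance

def pvWitness_solution : List Int × List Int := ([93, 30, 55], [1, 30, 5])

def Spec_solution (progresses : List Int) (speeds : List Int) (out : List Int) : Prop := out = solution_alt progresses speeds
instance (progresses : List Int) (speeds : List Int) (out : List Int) : Decidable (Spec_solution progresses speeds out) := by unfold Spec_solution; infer_instance

-- ===== CLAIM (what is proved, stated in full; the proofs are below) =====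
def Claim_equal_solution : Prop := ∀ (progresses : List Int) (speeds : List Int), Dom_solution progresses speeds → Pre_solution progresses speeds → Spec_solution progresses speeds (solution progresses speeds)

-- ===== LEMMAS AND PROOFS =====

-- B's per-task day count
def dayB (p s : Int) : Int := if 100 ≤ p then 0 else PySem.Int.floordiv (99 - p) s + 1

lemma floordiv_sub_self (a s : Int) (hs : 0 < s) :
    PySem.Int.floordiv (a - s) s = PySem.Int.floordiv a s - 1 := by
  have h := (PySem.Int.floordiv_eq_iff_of_pos (a := a) (b := s) hs).mp rfl
  refine (PySem.Int.floordiv_eq_iff_of_pos hs).mpr ⟨?_, ?_⟩ <;> nlinarith [h.1, h.2]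

lemma floordiv_small (a s : Int) (hs : 0 < s) (h0 : 0 ≤ a) (h1 : a < s) :
    PySem.Int.floordiv a s = 0 := by
  refine (PySem.Int.floordiv_eq_iff_of_pos hs).mpr ⟨by simpa, by simpa⟩

lemma dayB_step (p s : Int) (hp : p < 100) (hs : 1 ≤ s) :
    dayB (p + s) s + 1 = dayB p s := by
  unfold dayB
  by_cases h : 100 ≤ p + s
  · rw [if_pos h, if_neg (by omega)]
    rw [floordiv_small (99 - p) s (by omega) (by omega) (by omega)]
  · rw [if_neg h, if_neg (by omega)]
    have he : (99 : Int) - (p + s) = (99 - p) - s := by ring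
    rw [he, floordiv_sub_self _ s (by omega)]
    ring

lemma loopA_spec (fuel : Nat) (p s c : Int) (hps : 100 ≤ p ∨ 1 ≤ s)
    (hf : 100 - p ≤ (fuel : Int)) :
    100 ≤ (loopA fuel p s c).1 ∧ (loopA fuel p s c).2 = c + dayB p s := by
  induction fuel generalizing p c with
  | zero =>
      have hp : (100 : Int) ≤ p := by simpa using hf
      simp [loopA, dayB, hp]
  | succ n ih =>
      by_cases hp : p < 100
      · have hs : (1 : Int) ≤ s := by omega
        have hrec := ih (p + s) (c + 1) (Or.inr hs) (by push_cast at hf ⊢; omega)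
        simp only [loopA, if_pos hp]
        refine ⟨hrec.1, ?_⟩
        rw [hrec.2, ← dayB_step p s hp hs]
        ring
      · simp [loopA, hp, dayB, (by omega : (100:Int) ≤ p)]

lemma phase1_spec (ps ss res : List Int)
    (hpre : ∀ pr ∈ ps.zip ss, 100 ≤ pr.1 ∨ 1 ≤ pr.2)
    (hdom : ∀ pr ∈ ps.zip ss, -2147483648 ≤ pr.1)
    (hlen : ps.length ≤ ss.length) :
    phase1 ps ss res = res ++ (ps.zip ss).map (fun pr => dayB pr.1 pr.2) := by
  induction ps generalizing ss res with
  | nil => simp [phase1]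
  | cons p ps ih =>
      cases ss with
      | nil => simp at hlen
      | cons s ss =>
          have hmem : ((p, s) : Int × Int) ∈ (p :: ps).zip (s :: ss) := by
            simp [List.zip_cons_cons]
          have hl := loopA_spec fuelA p s 0 (hpre _ hmem)
            (by have := hdom _ hmem; unfold fuelA; push_cast; omega)
          simp only [phase1, if_pos hl.1, List.zip_cons_cons, List.map_cons]
          rw [ih ss (res ++ [(loopA fuelA p s 0).2])
              (fun pr h => hpre pr (by simp [List.zip_cons_cons, h]))
              (fun pr h => hdom pr (by simp [List.zip_cons_cons, h]))
              (by simpa using hlen)]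
          simp [hl.2]

lemma phase2_spec (ds : List Int) (t0 : Int) (tmp answer : List Int) :
    phase2 ds (t0 :: tmp) answer = answer ++ groupB ds t0 ((tmp.length : Int) + 1) := by
  induction ds generalizing t0 tmp answer with
  | nil => simp [phase2, groupB]
  | cons d ds ih =>
      simp only [phase2, groupB]
      by_cases h : d ≤ t0
      · rw [if_pos h, if_pos h]
        have he : t0 :: tmp ++ [d] = t0 :: (tmp ++ [d]) := by simp
        rw [he, ih]
        simp
      · rw [if_neg h, if_neg h, ih]
        simp

-- ===== VERDICT (by name: the statement is the Claim_ definition above) =====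
theorem solution_spec : Claim_equal_solution := by
  intro progresses speeds hdom hpre
  unfold Spec_solution solution solution_alt
  obtain ⟨hlen, hspd⟩ := hpre
  have hdomp : ∀ pr ∈ progresses.reverse.zip speeds.reverse, (-2147483648 : Int) ≤ pr.1 := by
    intro pr h
    have hm : pr.1 ∈ progresses := by
      have := (List.of_mem_zip h).1
      simpa using this
    have hall : progresses.all (fun y0_ => pvDomInt y0_) = true := by
      unfold Dom_solution at hdom
      exact (Bool.and_eq_true _ _ ▸ hdom).1
    have := List.all_eq_true.mp hall _ hm
    simp [pvDomInt] at this
    omega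
  rw [phase1_spec _ _ _ hspd hdomp (by simp [hlen])]
  simp only [List.nil_append]
  cases hz : ((progresses.reverse.zip speeds.reverse).map (fun pr => dayB pr.1 pr.2)).reverse with
  | nil =>
      have hz' : ((progresses.reverse.zip speeds.reverse).map
          (fun pr => if 100 ≤ pr.1 then 0 else PySem.Int.floordiv (99 - pr.1) pr.2 + 1)).reverse
          = [] := by rw [← hz]; rfl
      rw [hz']
      simp [phase2]
  | cons d ds =>
      have hz' : ((progresses.reverse.zip speeds.reverse).map
          (fun pr => if 100 ≤ pr.1 then 0 else PySem.Int.floordiv (99 - pr.1) pr.2 + 1)).reverse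
          = d :: ds := by rw [← hz]; rfl
      rw [hz']
      simp only [phase2, phase2_spec]
      simp
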